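-- pv_equiv track=rewrite | github.com/bros-bioinfo/bros-bioinfo.github.io | COURS/M1/SEMESTRE2/ALGO/exos_tris/exercice_3.py | rechercher_minimum
-- ===== SOURCE A (Python) =====
-- def rechercher_minimum( T, indice_debut, indice_fin ):
--     """
--     Renvoie l'indice du premier element de T qui est le plus petit element du
--     tableau dont l'indice est compris entre `indice_debut` inclu et
--     `indice_fin` exclu.
--
--     Complexite:
--         pire cas : O( indice_fin - indice_debut )
--         meilleur cas : omega( indice_fin - indice_debut )
--
--     Exemples:
--         >>> T = [3,4,5,1,3,5,1,2]
--         >>> rechercher_minimum( T, 0, len(T) )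
--         3
--         >>> T = []
--         >>> rechercher_minimum( T, 0, len(T) )
--         >>> T = [3]
--         >>> rechercher_minimum( T, 0, len(T) )
--         0
--         >>> T = [3,1]
--         >>> rechercher_minimum( T, 0, len(T) )
--         1
--     """
--     if indice_debut >= indice_fin :
--         return None
--     id_minimum = indice_debut
--     minimum = T[indice_debut]
--     for i in range( indice_debut, indice_fin ):
--         if T[i] < minimum:
--             id_minimum = i
--             minimum = T[i]
--     return id_minimum
-- ===== SOURCE B (Python) =====
-- def rechercher_minimum(T, indice_debut, indice_fin):
--     if indice_debut >= indice_fin: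
--         return None
--     if indice_fin - indice_debut == 1:
--         return indice_debut
--     milieu = (indice_debut + indice_fin) // 2
--     gauche = rechercher_minimum(T, indice_debut, milieu)
--     droite = rechercher_minimum(T, milieu, indice_fin)
--     return gauche if T[gauche] <= T[droite] else droite
-- ===== Notes on version B (the rewrite author's own statement) =====
-- stated objective: alternative
-- what changed: Replaces A's single left-to-right scan with an accumulator by a recursive divide-and-conquer: split the range at the midpoint, find the first minimum index of each half, and keep the left one on ties (<=), which reproduces A's first-occurrence tie-breaking.
import Mathlib
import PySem

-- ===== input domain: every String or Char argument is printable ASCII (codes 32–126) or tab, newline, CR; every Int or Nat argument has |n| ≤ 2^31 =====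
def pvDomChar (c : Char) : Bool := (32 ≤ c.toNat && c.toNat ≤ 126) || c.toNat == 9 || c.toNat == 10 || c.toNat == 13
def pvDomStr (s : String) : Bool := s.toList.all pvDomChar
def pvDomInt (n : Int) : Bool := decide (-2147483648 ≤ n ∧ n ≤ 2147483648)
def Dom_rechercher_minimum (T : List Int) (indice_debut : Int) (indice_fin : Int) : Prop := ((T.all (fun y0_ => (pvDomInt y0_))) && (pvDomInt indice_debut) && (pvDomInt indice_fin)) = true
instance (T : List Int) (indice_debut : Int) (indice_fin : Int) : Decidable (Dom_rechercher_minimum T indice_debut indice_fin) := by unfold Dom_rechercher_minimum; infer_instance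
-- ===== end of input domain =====

-- B re-implements A's left-to-right minimum scan as a midpoint divide-and-conquer with <=
-- tie-breaking (objective: alternative, same cost); equivalence is proved on all inputs where A
-- does not raise an IndexError.

-- ===== PORT A =====
-- one iteration of A's 'for i in range(indice_debut, indice_fin)' loop; state = (id_minimum, minimum)
def pvStep (T : List Int) (s : Int × Int) (i : Int) : Int × Int :=
  match PySem.List.pyGet? T i with
  | some v => if v < s.2 then (i, v) else s
  | none => s   -- T[i] raises IndexError in Python; such inputs are excluded by Pre_

def rechercher_minimum (T : List Int) (indice_debut : Int) (indice_fin : Int) : Option Int :=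
  if indice_debut ≥ indice_fin then none
  else
    match PySem.List.pyGet? T indice_debut with
    | none => none   -- T[indice_debut] raises IndexError; excluded by Pre_
    | some minimum =>
        some (((PySem.List.pyRange indice_debut indice_fin 1).foldl (pvStep T)
                (indice_debut, minimum)).1)

-- ===== PORT B =====
-- B's comparison T[g] (a plain index access; always in range on Pre_ when reached)
def pvVal (T : List Int) (i : Int) : Int := (PySem.List.pyGet? T i).getD 0

-- B's recursion, made structural on the fuel (indice_fin - indice_debut).toNat, which strictly
-- decreases at each recursive call; fuel 0 is only reached when the range is empty.
def pvDC (T : List Int) (indice_debut : Int) (indice_fin : Int) : Nat → Option Int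
  | 0 => none
  | fuel + 1 =>
    if indice_debut ≥ indice_fin then none
    else if indice_fin - indice_debut = 1 then some indice_debut
    else
      let milieu := PySem.Int.floordiv (indice_debut + indice_fin) 2
      match pvDC T indice_debut milieu fuel, pvDC T milieu indice_fin fuel with
      | some g, some dr => if pvVal T g ≤ pvVal T dr then some g else some dr
      | some g, none => some g     -- unreachable: both halves are nonempty
      | none, o => o               -- unreachable

def rechercher_minimum_alt (T : List Int) (indice_debut : Int) (indice_fin : Int) : Option Int :=
  pvDC T indice_debut indice_fin (indice_fin - indice_debut).toNat

-- ===== PRECONDITION & SPEC =====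
-- Pre_ excludes exactly the inputs where A raises IndexError: a nonempty requested range whose
-- indices are not all valid (Python) indices of T.
def Pre_rechercher_minimum (T : List Int) (indice_debut : Int) (indice_fin : Int) : Prop :=
  indice_fin ≤ indice_debut ∨
    (-(T.length : Int) ≤ indice_debut ∧ indice_fin ≤ (T.length : Int))

instance (T : List Int) (indice_debut : Int) (indice_fin : Int) :
    Decidable (Pre_rechercher_minimum T indice_debut indice_fin) := by
  unfold Pre_rechercher_minimum; infer_instance

def pvWitness_rechercher_minimum : List Int × Int × Int := ([3, 4, 5, 1, 3, 5, 1, 2], 0, 8)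

def Spec_rechercher_minimum (T : List Int) (indice_debut : Int) (indice_fin : Int) (out : Option Int) : Prop := out = rechercher_minimum_alt T indice_debut indice_fin
instance (T : List Int) (indice_debut : Int) (indice_fin : Int) (out : Option Int) : Decidable (Spec_rechercher_minimum T indice_debut indice_fin out) := by unfold Spec_rechercher_minimum; infer_instance

-- ===== CLAIM (what is proved, stated in full; the proofs are below) =====
def Claim_equal_rechercher_minimum : Prop := ∀ (T : List Int) (indice_debut : Int) (indice_fin : Int), Dom_rechercher_minimum T indice_debut indice_fin → Pre_rechercher_minimum T indice_debut indice_fin → Spec_rechercher_minimum T indice_debut indice_fin (rechercher_minimum T indice_debut indice_fin)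

-- ===== LEMMAS AND PROOFS =====

-- proof-only variant of A's loop body: on in-range indices pvStep acts as pvStep'
def pvStep' (T : List Int) (s : Int × Int) (i : Int) : Int × Int :=
  if pvVal T i < s.2 then (i, pvVal T i) else s

theorem pvGet_some (T : List Int) (i : Int) (h : -(T.length : Int) ≤ i) (h2 : i < T.length) :
    PySem.List.pyGet? T i = some (pvVal T i) := by
  have : PySem.List.pyGet? T i = some (PySem.List.pyGetD T i 0) := by
    simp only [PySem.List.pyGet?, PySem.List.pyGetD, PySem.List.pyIdx?]
    split_ifs with h1 <;> simp_all <;> rw [List.getElem?_eq_getElem (by omega)] <;> simp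
  simp [pvVal, this]

theorem pvFold_congr (T : List Int) (r : List Int) (s : Int × Int)
    (hb : ∀ i ∈ r, -(T.length : Int) ≤ i ∧ i < T.length) :
    r.foldl (pvStep T) s = r.foldl (pvStep' T) s := by
  apply PySem.List.foldl_congr_mem
  intro acc x hx
  obtain ⟨h1, h2⟩ := hb x hx
  simp [pvStep, pvStep', pvGet_some T x h1 h2]

theorem pvFold_min (T : List Int) (r : List Int) :
    ∀ s : Int × Int, (r.foldl (pvStep' T) s).2 ≤ s.2 ∧
      ∀ x ∈ r, (r.foldl (pvStep' T) s).2 ≤ pvVal T x := by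
  induction r with
  | nil => simp
  | cons a rs ih =>
    intro s
    simp only [List.foldl_cons]
    obtain ⟨h1, h2⟩ := ih (pvStep' T s a)
    refine ⟨?_, ?_⟩
    · refine le_trans h1 ?_
      simp only [pvStep']; split_ifs with h
      · simpa using le_of_lt h
      · exact le_refl _
    · intro x hx
      rcases List.mem_cons.mp hx with rfl | hx
      · refine le_trans h1 ?_
        simp only [pvStep']; split_ifs with h
        · exact le_refl _
        · simpa using not_lt.mp h
      · exact h2 x hx

theorem pvFold_stay (T : List Int) (r : List Int) :
    ∀ s : Int × Int, (∀ x ∈ r, s.2 ≤ pvVal T x) → r.foldl (pvStep' T) s = s := by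
  induction r with
  | nil => simp
  | cons a rs ih =>
    intro s h
    simp only [List.foldl_cons]
    have ha : ¬ pvVal T a < s.2 := not_lt.mpr (h a (by simp))
    rw [show pvStep' T s a = s by simp [pvStep', ha]]
    exact ih s (fun x hx => h x (by simp [hx]))

theorem pvFold_mem (T : List Int) (r : List Int) :
    ∀ s : Int × Int, (r.foldl (pvStep' T) s).1 = s.1 ∨ (r.foldl (pvStep' T) s).1 ∈ r := by
  induction r with
  | nil => simp
  | cons a rs ih =>
    intro s
    simp only [List.foldl_cons]
    by_cases hc : pvVal T a < s.2
    · rw [show pvStep' T s a = (a, pvVal T a) by simp [pvStep', hc]]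
      rcases ih (a, pvVal T a) with h | h
      · right; simp [h]
      · right; simp [h]
    · rw [show pvStep' T s a = s by simp [pvStep', hc]]
      rcases ih s with h | h
      · left; exact h
      · right; simp [h]

theorem pvFold_inv (T : List Int) (r : List Int) :
    ∀ s : Int × Int, s.2 = pvVal T s.1 → (r.foldl (pvStep' T) s).2 = pvVal T (r.foldl (pvStep' T) s).1 := by
  induction r with
  | nil => simpa using fun s h => h
  | cons a rs ih =>
    intro s h
    simp only [List.foldl_cons]
    apply ih
    simp only [pvStep']; split_ifs <;> simp [h]

theorem pvFold_indep (T : List Int) (r : List Int) :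
    ∀ s t : Int × Int, (∃ x ∈ r, pvVal T x < s.2) → (∃ x ∈ r, pvVal T x < t.2) →
      r.foldl (pvStep' T) s = r.foldl (pvStep' T) t := by
  induction r with
  | nil => simp
  | cons a rs ih =>
    intro s t hs ht
    simp only [List.foldl_cons]
    by_cases has : pvVal T a < s.2 <;> by_cases hat : pvVal T a < t.2
    · rw [show pvStep' T s a = (a, pvVal T a) by simp [pvStep', has],
          show pvStep' T t a = (a, pvVal T a) by simp [pvStep', hat]]
    · -- s improves at a, t does not: t's witness is in rs and also improves (a, pvVal T a)
      rw [show pvStep' T s a = (a, pvVal T a) by simp [pvStep', has],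
          show pvStep' T t a = t by simp [pvStep', hat]]
      obtain ⟨y, hy, hyt⟩ := ht
      rcases List.mem_cons.mp hy with rfl | hy
      · omega
      · exact ih (a, pvVal T a) t ⟨y, hy, by simp; omega⟩ ⟨y, hy, hyt⟩
    · rw [show pvStep' T s a = s by simp [pvStep', has],
          show pvStep' T t a = (a, pvVal T a) by simp [pvStep', hat]]
      obtain ⟨y, hy, hys⟩ := hs
      rcases List.mem_cons.mp hy with rfl | hy
      · omega
      · exact ih s (a, pvVal T a) ⟨y, hy, hys⟩ ⟨y, hy, by simp; omega⟩
    · rw [show pvStep' T s a = s by simp [pvStep', has],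
          show pvStep' T t a = t by simp [pvStep', hat]]
      obtain ⟨y, hy, hys⟩ := hs
      obtain ⟨z, hz, hzt⟩ := ht
      rcases List.mem_cons.mp hy with rfl | hy
      · omega
      rcases List.mem_cons.mp hz with rfl | hz
      · omega
      exact ih s t ⟨y, hy, hys⟩ ⟨z, hz, hzt⟩

-- A's result on a nonempty in-range interval, written with the total loop body
theorem pvA_eq (T : List Int) (d f : Int) (hdf : d < f)
    (hlo : -(T.length : Int) ≤ d) (hhi : f ≤ (T.length : Int)) :
    rechercher_minimum T d f =
      some (((PySem.List.pyRange d f 1).foldl (pvStep' T) (d, pvVal T d)).1) := by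
  unfold rechercher_minimum
  simp only [if_neg (show ¬ d ≥ f by omega), pvGet_some T d hlo (by omega)]
  rw [pvFold_congr T _ _ (fun i hi => by
    have := PySem.List.mem_pyRange_one.mp hi
    constructor <;> omega)]

-- splitting A's scan at an interior point m: keep the left result on ties
theorem pvMerge (T : List Int) (d m f : Int) (h1 : d < m) (h2 : m < f) :
    (PySem.List.pyRange d f 1).foldl (pvStep' T) (d, pvVal T d) =
      (if ((PySem.List.pyRange d m 1).foldl (pvStep' T) (d, pvVal T d)).2 ≤
          ((PySem.List.pyRange m f 1).foldl (pvStep' T) (m, pvVal T m)).2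
       then (PySem.List.pyRange d m 1).foldl (pvStep' T) (d, pvVal T d)
       else (PySem.List.pyRange m f 1).foldl (pvStep' T) (m, pvVal T m)) := by
  set sL := (PySem.List.pyRange d m 1).foldl (pvStep' T) (d, pvVal T d) with hsL
  set sR := (PySem.List.pyRange m f 1).foldl (pvStep' T) (m, pvVal T m) with hsR
  rw [PySem.List.pyRange_one_append d m f (by omega) (by omega), List.foldl_append, ← hsL]
  have hRinv : sR.2 = pvVal T sR.1 := pvFold_inv T _ _ rfl
  by_cases h : ∀ x ∈ PySem.List.pyRange m f 1, sL.2 ≤ pvVal T x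
  · rw [pvFold_stay T _ sL h]
    have hmem : sR.1 ∈ PySem.List.pyRange m f 1 := by
      rcases pvFold_mem T (PySem.List.pyRange m f 1) (m, pvVal T m) with hm | hm
      · rw [← hsR] at hm; rw [hm]; exact PySem.List.mem_pyRange_one.mpr ⟨le_refl m, h2⟩
      · rw [← hsR] at hm; exact hm
    rw [if_pos (by rw [hRinv]; exact h sR.1 hmem)]
  · push_neg at h
    obtain ⟨x, hx, hxlt⟩ := h
    have hRlt : sR.2 < sL.2 :=
      lt_of_le_of_lt ((pvFold_min T (PySem.List.pyRange m f 1) (m, pvVal T m)).2 x hx) hxlt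
    rw [if_neg (by omega)]
    rw [PySem.List.pyRange_one_cons h2] at hx hsR ⊢
    simp only [List.foldl_cons] at hsR ⊢
    rw [show pvStep' T (m, pvVal T m) m = (m, pvVal T m) by simp [pvStep']] at hsR
    by_cases hgm : pvVal T m < sL.2
    · rw [show pvStep' T sL m = (m, pvVal T m) by simp [pvStep', hgm], hsR]
    · rw [show pvStep' T sL m = sL by simp [pvStep', hgm], hsR]
      rcases List.mem_cons.mp hx with rfl | hx'
      · omega
      · exact pvFold_indep T _ sL (m, pvVal T m) ⟨x, hx', hxlt⟩ ⟨x, hx', by simp; omega⟩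

theorem pvMain (fuel : Nat) : ∀ (T : List Int) (d f : Int), (f - d).toNat ≤ fuel →
    Pre_rechercher_minimum T d f → rechercher_minimum T d f = pvDC T d f fuel := by
  induction fuel with
  | zero =>
    intro T d f hn _
    have : f ≤ d := by omega
    simp [rechercher_minimum, pvDC, if_pos (by omega : d ≥ f)]
  | succ fuel ih =>
    intro T d f hn hpre
    by_cases hdf : d ≥ f
    · simp [rechercher_minimum, pvDC, hdf]
    push_neg at hdf
    have hb : -(T.length : Int) ≤ d ∧ f ≤ (T.length : Int) := by
      rcases hpre with h | h
      · omega
      · exact h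
    by_cases h1 : f - d = 1
    · have hf : f = d + 1 := by omega
      subst hf
      rw [pvA_eq T d (d + 1) hdf hb.1 hb.2]
      simp only [pvDC]
      rw [if_neg (show ¬ d ≥ d + 1 by omega), if_pos (show d + 1 - d = 1 by omega)]
      rw [PySem.List.pyRange_one_singleton]
      simp [pvStep']
    · have h2 : d + 2 ≤ f := by omega
      have hmid : PySem.Int.floordiv (d + f) 2 = (d + f) / 2 :=
        PySem.Int.floordiv_eq_ediv_of_pos (by norm_num)
      set m := PySem.Int.floordiv (d + f) 2 with hm
      have hdm : d < m := by omega
      have hmf : m < f := by omega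
      rw [pvA_eq T d f hdf hb.1 hb.2, pvMerge T d m f hdm hmf]
      have hAL : rechercher_minimum T d m =
          some (((PySem.List.pyRange d m 1).foldl (pvStep' T) (d, pvVal T d)).1) :=
        pvA_eq T d m hdm hb.1 (by omega)
      have hAR : rechercher_minimum T m f =
          some (((PySem.List.pyRange m f 1).foldl (pvStep' T) (m, pvVal T m)).1) :=
        pvA_eq T m f hmf (by omega) hb.2
      have hBL : pvDC T d m fuel =
          some (((PySem.List.pyRange d m 1).foldl (pvStep' T) (d, pvVal T d)).1) := by
        rw [← ih T d m (by omega) (Or.inr ⟨hb.1, by omega⟩)]; exact hAL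
      have hBR : pvDC T m f fuel =
          some (((PySem.List.pyRange m f 1).foldl (pvStep' T) (m, pvVal T m)).1) := by
        rw [← ih T m f (by omega) (Or.inr ⟨by omega, hb.2⟩)]; exact hAR
      have hLinv := pvFold_inv T (PySem.List.pyRange d m 1) (d, pvVal T d) rfl
      have hRinv := pvFold_inv T (PySem.List.pyRange m f 1) (m, pvVal T m) rfl
      simp only [pvDC, if_neg (by omega : ¬ d ≥ f), if_neg h1, ← hm, hBL, hBR]
      rw [← hLinv, ← hRinv]
      split_ifs <;> rfl

-- ===== VERDICT (by name: the statement is the Claim_ definition above) =====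
theorem rechercher_minimum_spec : Claim_equal_rechercher_minimum := by
  intro T d f _ hpre
  unfold Spec_rechercher_minimum rechercher_minimum_alt
  exact pvMain (f - d).toNat T d f (le_refl _) hpre
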